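-- pv_equiv track=rewrite | github.com/maxhormazabal/depencendy_parsing | nlu_model_utils.py | checkHead
-- ===== SOURCE A (Python) =====
-- def checkHead(vector):
--   # Contamos cuantos elementos son iguales a 0
--   vector = list(vector)
--   zeros = vector.count(0)
--
--   if zeros == 0:
--     # Buscamos el primer elemento con valor 999
--     try:
--       first_999_index = vector.index(999)
--     except ValueError:
--       # Si no existe ningun 999, cambiamos el primer elemento por 0
--       vector[0] = 0
--     else:
--       # Si existe un 999, cambiamos ese elemento por 0
--       vector[first_999_index] = 0
--
--   # Si existen más de un cero, cambiamos todos los ceros excepto el primero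
--   if zeros > 1:
--     first_zero_index = vector.index(0)
--     for i in range(len(vector)):
--       if vector[i] == 0 and i != first_zero_index:
--         vector[i] = first_zero_index + 1
--
--   # Reemplazamos los 999 por la posición del elemento que tiene el único valor 0
--   for i in range(len(vector)):
--     if vector[i] == 999:
--       vector[i] = vector.index(0) + 1
--   return vector
-- ===== SOURCE B (Python) =====
-- def checkHead(vector):
--   vector = list(vector)
--   # canonical zero position: first 0 if any, else first 999, else position 0
--   if 0 in vector:
--     z = vector.index(0)
--   elif 999 in vector:
--     z = vector.index(999)
--   else:
--     z = 0
--   vector[z] = 0  # raises IndexError on an empty vector, like the original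
--   return [z + 1 if i != z and x in (0, 999) else x for i, x in enumerate(vector)]
-- ===== Notes on version B (the rewrite author's own statement) =====
-- stated objective: simpler
-- what changed: B computes the canonical zero index once with a three-way branch and then rewrites the list in a single enumerate pass, instead of A's separate extra-zero pass and 999 pass with a vector.index(0) rescan at every 999.
-- outside the precondition, e.g. on checkHead([]): A raises IndexError, B raises IndexError
import Mathlib
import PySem

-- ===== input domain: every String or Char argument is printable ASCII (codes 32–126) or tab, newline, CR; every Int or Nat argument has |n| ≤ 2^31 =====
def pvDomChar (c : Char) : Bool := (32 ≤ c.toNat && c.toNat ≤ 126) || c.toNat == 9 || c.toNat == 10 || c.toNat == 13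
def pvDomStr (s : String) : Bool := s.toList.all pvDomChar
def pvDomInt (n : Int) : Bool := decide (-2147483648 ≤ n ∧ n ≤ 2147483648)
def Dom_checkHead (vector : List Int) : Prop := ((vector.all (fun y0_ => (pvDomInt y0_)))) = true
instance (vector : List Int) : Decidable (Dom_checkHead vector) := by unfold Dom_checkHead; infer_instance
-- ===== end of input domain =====

-- B precomputes the canonical zero position once and merges A's two rewrite passes into one pass (objective: simpler); equal return values on every nonempty list.

-- ===== PORT A =====
def checkHead (vector : List Int) : List Int :=
  let zeros := PySem.List.count vector 0
  let v1 :=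
    if zeros = 0 then
      match PySem.List.index? vector 999 with
      | some p => PySem.List.pySetD vector (p : Int) 0        -- vector[first_999_index] = 0
      | none   => PySem.List.pySetD vector 0 0                -- vector[0] = 0; IndexError on [] — excluded by Pre_
    else vector
  let v2 :=
    if zeros > 1 then
      -- vector.index(0): always succeeds here since zeros > 1
      let fzi : Nat := (PySem.List.index? v1 0).getD 0
      (PySem.List.pyRange 0 (v1.length : Int) 1).foldl
        (fun w i => if PySem.List.pyGetD w i 0 = 0 ∧ i ≠ (fzi : Int) then PySem.List.pySetD w i ((fzi : Int) + 1) else w) v1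
    else v1
  -- final pass: vector.index(0) is re-evaluated on the current list at each hit, as in the Python
  -- (a 0 is always present at this point, so .getD 0 is never the ValueError case)
  (PySem.List.pyRange 0 (v2.length : Int) 1).foldl
    (fun w i => if PySem.List.pyGetD w i 0 = 999 then
        PySem.List.pySetD w i ((((PySem.List.index? w 0).getD 0 : Nat) : Int) + 1)
      else w) v2

-- ===== PORT B =====
def checkHead_alt (vector : List Int) : List Int :=
  let z : Nat :=
    if vector.contains 0 then (PySem.List.index? vector 0).getD 0
    else if vector.contains 999 then (PySem.List.index? vector 999).getD 0
    else 0
  let v := PySem.List.pySetD vector (z : Int) 0               -- vector[z] = 0; IndexError on [] — excluded by Pre_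
  (PySem.List.enumerate v 0).map
    (fun p => if p.1 ≠ (z : Int) ∧ (p.2 = 0 ∨ p.2 = 999) then (z : Int) + 1 else p.2)

-- ===== PRECONDITION & SPEC =====
-- Pre_ excludes only the empty list, on which both A and B raise IndexError.
def Pre_checkHead (vector : List Int) : Prop := vector ≠ []
instance (vector : List Int) : Decidable (Pre_checkHead vector) := by unfold Pre_checkHead; infer_instance
def pvWitness_checkHead : List Int := [999, 3, 0, 0]

def Spec_checkHead (vector : List Int) (out : List Int) : Prop := out = checkHead_alt vector
instance (vector : List Int) (out : List Int) : Decidable (Spec_checkHead vector out) := by unfold Spec_checkHead; infer_instance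

-- ===== CLAIM (what is proved, stated in full; the proofs are below) =====
def Claim_equal_checkHead : Prop := ∀ (vector : List Int), Dom_checkHead vector → Pre_checkHead vector → Spec_checkHead vector (checkHead vector)

-- ===== LEMMAS AND PROOFS =====

-- first-occurrence characterisation of index? (converse of PySem.List.getElem_of_index?_eq_some)
lemma index?_eq_some_of_first (l : List Int) (v : Int) :
    ∀ (z : Nat), l[z]? = some v → (∀ j, j < z → l[j]? ≠ some v) → PySem.List.index? l v = some z := by
  induction l with
  | nil => intro z hz _; simp at hz
  | cons x xs ih =>
    intro z hz hlt
    cases z with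
    | zero =>
      simp at hz
      subst hz
      exact PySem.List.index?_cons_self _ _
    | succ z =>
      have hx : x ≠ v := by
        intro e
        exact hlt 0 (Nat.succ_pos z) (by simp [e])
      rw [PySem.List.index?_cons_of_ne _ hx]
      rw [ih z (by simpa using hz) (fun j hj => by
        have := hlt (j+1) (Nat.succ_lt_succ hj)
        simpa using this)]
      rfl

-- a list is unchanged by writing back the element it already holds
lemma set_of_getElem? (l : List Int) (i : Nat) (a : Int) (h : l[i]? = some a) : l.set i a = l := by
  apply List.ext_getElem?
  intro j
  by_cases hj : j = i
  · subst hj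
    obtain ⟨hi2, e⟩ := List.getElem?_eq_some_iff.mp h
    simp [hi2, e]
  · simp [List.getElem?_set_ne (fun hij => hj hij.symm)]

-- a foldl over the index range that conditionally overwrites position i (reading only position i) is a mapIdx
lemma foldl_set_aux (Q : Nat → Int → Prop) [inst : ∀ j x, Decidable (Q j x)] (c : Int) :
    ∀ (suf pre : List Int),
      (List.range' pre.length suf.length 1).foldl
          (fun w i => if Q i (w.getD i 0) then w.set i c else w) (pre ++ suf)
        = pre ++ suf.mapIdx (fun j x => if Q (pre.length + j) x then c else x) := by
  intro suf
  induction suf with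
  | nil => intro pre; simp
  | cons x xs ih =>
    intro pre
    rw [List.length_cons, List.range'_succ, List.foldl_cons]
    have hget : (pre ++ x :: xs).getD pre.length 0 = x := by
      simp [List.getD]
    have hset : (pre ++ x :: xs).set pre.length c = pre ++ c :: xs := by
      rw [List.set_append]
      simp
    have hstep : (if Q pre.length ((pre ++ x :: xs).getD pre.length 0) then (pre ++ x :: xs).set pre.length c else pre ++ x :: xs)
        = (pre ++ [if Q pre.length x then c else x]) ++ xs := by
      by_cases hq : Q pre.length x
      · simp only [hget, hq, if_pos, hset]; simp
      · simp only [hget, hq, if_neg, not_false_iff]; simp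
    rw [hstep]
    have hlen : pre.length + 1 = (pre ++ [if Q pre.length x then c else x]).length := by simp
    rw [hlen, ih]
    simp only [List.mapIdx_cons, List.append_assoc, List.singleton_append, List.length_append,
      List.length_singleton, Nat.add_zero]
    congr 2
    apply List.ext_getElem (by simp)
    intro i h1 h2
    simp only [List.getElem_mapIdx]
    congr 2
    omega

lemma foldl_set_eq_mapIdx (Q : Nat → Int → Prop) [inst : ∀ j x, Decidable (Q j x)] (c : Int) (v : List Int) :
    (List.range v.length).foldl (fun w i => if Q i (w.getD i 0) then w.set i c else w) v
      = v.mapIdx (fun j x => if Q j x then c else x) := by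
  have h := foldl_set_aux Q c v []
  simpa [List.range_eq_range'] using h

-- replace the step function of a foldl under an invariant of the accumulator
lemma foldl_inv_congr {α σ : Type} (l : List α) (g g' : σ → α → σ) (I : σ → Prop) (s : σ)
    (hs : I s) (hpres : ∀ t a, I t → I (g t a)) (hag : ∀ t a, I t → g t a = g' t a) :
    l.foldl g s = l.foldl g' s := by
  induction l generalizing s with
  | nil => rfl
  | cons a l ih => simp only [List.foldl_cons, hag s a hs]; rw [← hag s a hs]; exact ih (g s a) (hpres s a hs)

-- A's extra-zeros pass is a mapIdx
lemma loopzero_eq (v : List Int) (z : Nat) :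
    (PySem.List.pyRange 0 (v.length : Int) 1).foldl
        (fun w i => if PySem.List.pyGetD w i 0 = 0 ∧ i ≠ (z : Int) then PySem.List.pySetD w i ((z : Int) + 1) else w) v
      = v.mapIdx (fun j x => if x = 0 ∧ (j : Int) ≠ (z : Int) then (z : Int) + 1 else x) := by
  rw [PySem.List.pyRange_zero_natCast, List.foldl_map]
  simp only [PySem.List.pyGetD_natCast, PySem.List.pySetD_natCast]
  exact foldl_set_eq_mapIdx (fun j x => x = 0 ∧ (j : Int) ≠ (z : Int)) ((z : Int) + 1) v

-- A's 999 pass is a mapIdx when the first zero of the list sits at z (the rescans all return z)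
lemma loop999_eq (v : List Int) (z : Nat) (hz : v[z]? = some 0) (hfirst : ∀ j, j < z → v[j]? ≠ some 0) :
    (PySem.List.pyRange 0 (v.length : Int) 1).foldl
        (fun w i => if PySem.List.pyGetD w i 0 = 999 then
            PySem.List.pySetD w i ((((PySem.List.index? w 0).getD 0 : Nat) : Int) + 1)
          else w) v
      = v.mapIdx (fun _ x => if x = 999 then (z : Int) + 1 else x) := by
  rw [PySem.List.pyRange_zero_natCast, List.foldl_map]
  simp only [PySem.List.pyGetD_natCast, PySem.List.pySetD_natCast]
  have hcongr : (List.range v.length).foldl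
      (fun w (i : Nat) => if w.getD i 0 = 999 then w.set i ((((PySem.List.index? w 0).getD 0 : Nat) : Int) + 1) else w) v
    = (List.range v.length).foldl
      (fun w (i : Nat) => if w.getD i 0 = 999 then w.set i ((z : Int) + 1) else w) v := by
    apply foldl_inv_congr _ _ _
      (fun w => w[z]? = some 0 ∧ ∀ j, j < z → w[j]? ≠ some 0)
      v ⟨hz, hfirst⟩
    · -- the invariant is preserved: a 999 is never at z, and z + 1 ≠ 0
      rintro t a ⟨ht, htf⟩
      by_cases hc : t.getD a 0 = 999
      · simp only [hc, if_pos]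
        have ha : t[a]? = some 999 := by
          rcases h : t[a]? with _ | y
          · simp [List.getD, h] at hc
          · simp [List.getD, h] at hc; simp [hc]
        have haz : a ≠ z := by intro e; rw [e, ht] at ha; simp at ha
        constructor
        · rw [List.getElem?_set_ne haz]; exact ht
        · intro j hj
          by_cases hja : j = a
          · subst hja
            have hlt : j < t.length := (List.getElem?_eq_some_iff.mp ha).1
            rw [List.getElem?_set_self hlt]
            intro e
            have : (((PySem.List.index? t 0).getD 0 : Nat) : Int) + 1 = 0 := by simpa using e
            omega
          · rw [List.getElem?_set_ne (fun e => hja e.symm)]; exact htf j hj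
      · simp only [hc, if_neg, not_false_iff]; exact ⟨ht, htf⟩
    · -- under the invariant the rescan index? returns exactly z
      rintro t a ⟨ht, htf⟩
      have h2 : PySem.List.index? t 0 = some z := index?_eq_some_of_first t 0 z ht htf
      simp only [h2, Option.getD_some]
  rw [hcongr]
  have h := foldl_set_eq_mapIdx (fun _ x => x = 999) ((z : Int) + 1) v
  simpa using h

-- B's single enumerate pass is a mapIdx
lemma enumerate_map_eq_mapIdx (F : Int → Int → Int) :
    ∀ (s : Int) (v : List Int),
      (PySem.List.enumerate v s).map (fun p => F p.1 p.2) = v.mapIdx (fun j x => F (s + (j : Int)) x) := by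
  intro s v
  induction v generalizing s with
  | nil => simp [PySem.List.enumerate_nil]
  | cons x xs ih =>
    rw [PySem.List.enumerate_cons, List.map_cons, List.mapIdx_cons, ih (s + 1)]
    congr 1
    · simp
    · apply List.ext_getElem (by simp)
      intro i h1 h2
      simp only [List.getElem_mapIdx]
      have : s + 1 + (i : Int) = s + ((i : Nat) + 1 : Nat) := by push_cast; ring
      rw [this]

-- two distinct zero positions force a count of at least 2
lemma two_le_count (l : List Int) (j k : Nat) (hjk : j < k)
    (hj : l[j]? = some 0) (hk : l[k]? = some 0) : 2 ≤ l.count 0 := by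
  have h1 : (0 : Int) ∈ l.take k := by
    have : (l.take k)[j]? = some 0 := by
      rw [List.getElem?_take]
      simp [hjk, hj]
    exact List.mem_of_getElem? this
  have h2 : (0 : Int) ∈ l.drop k := by
    have : (l.drop k)[0]? = some 0 := by
      rw [List.getElem?_drop]
      simpa using hk
    exact List.mem_of_getElem? this
  have hsplit := List.take_append_drop k l
  calc 2 ≤ (l.take k).count 0 + (l.drop k).count 0 := by
        have c1 := List.count_pos_iff.mpr h1
        have c2 := List.count_pos_iff.mpr h2
        omega
    _ = l.count 0 := by rw [← List.count_append, hsplit]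

-- when z holds the only zero, A's 999 pass agrees with B's merged pass
lemma final_single (v : List Int) (z : Nat) (hz : v[z]? = some 0) (huniq : ∀ j, j ≠ z → v[j]? ≠ some 0) :
    v.mapIdx (fun _ x => if x = 999 then (z : Int) + 1 else x)
      = v.mapIdx (fun j x => if (j : Int) ≠ (z : Int) ∧ (x = 0 ∨ x = 999) then (z : Int) + 1 else x) := by
  apply List.ext_getElem (by simp)
  intro i h1 h2
  have hi : i < v.length := by simpa using h1
  simp only [List.getElem_mapIdx]
  by_cases hiz : i = z
  · subst hiz
    have : v[i] = 0 := by
      have := (List.getElem?_eq_some_iff.mp hz).2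
      simpa using this
    simp [this]
  · have hne : v[i] ≠ 0 := by
      intro e
      exact huniq i hiz (by rw [List.getElem?_eq_getElem (by simpa using h1), e])
    have hcast : (i : Int) ≠ (z : Int) := by exact_mod_cast hiz
    by_cases h9 : v[i] = 999
    · simp [h9, hcast]
    · simp [h9, hcast, hne]

-- composing A's two passes (extra zeros, then 999s) gives B's merged pass
lemma final_double (v : List Int) (z : Nat) (hz : v[z]? = some 0) :
    (v.mapIdx (fun j x => if x = 0 ∧ (j : Int) ≠ (z : Int) then (z : Int) + 1 else x)).mapIdx
        (fun _ x => if x = 999 then (z : Int) + 1 else x)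
      = v.mapIdx (fun j x => if (j : Int) ≠ (z : Int) ∧ (x = 0 ∨ x = 999) then (z : Int) + 1 else x) := by
  rw [List.mapIdx_mapIdx]
  apply List.ext_getElem (by simp)
  intro i h1 h2
  have hi : i < v.length := by simpa using h1
  simp only [List.getElem_mapIdx]
  by_cases hiz : i = z
  · subst hiz
    have : v[i] = 0 := by
      have := (List.getElem?_eq_some_iff.mp hz).2
      simpa using this
    simp [this]
  · have hcast : (i : Int) ≠ (z : Int) := by exact_mod_cast hiz
    by_cases h0 : v[i] = 0
    · by_cases h999 : ((z : Int) + 1 = 999)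
      · simp [h0, hcast, h999]
      · simp [h0, hcast, h999]
    · by_cases h9 : v[i] = 999
      · simp [h9, hcast]
      · simp only [Function.comp_apply]
        rw [if_neg (show ¬(v[i] = 0 ∧ (i : Int) ≠ (z : Int)) from fun hc => h0 hc.1), if_neg h9, if_neg (by tauto)]

-- membership facts packaged once
lemma getElem?_ne_of_not_mem (l : List Int) (j : Nat) (h : (0 : Int) ∉ l) : l[j]? ≠ some 0 := by
  intro e
  exact h (List.mem_of_getElem? e)

-- the two programs agree on every nonempty input
lemma main_eq (vector : List Int) (hpre : vector ≠ []) : checkHead vector = checkHead_alt vector := by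
  by_cases h0 : (0 : Int) ∈ vector
  · -- the list has a zero: A keeps the list, B's set writes back the zero it found
    obtain ⟨z, hiz⟩ : ∃ z, PySem.List.index? vector 0 = some z :=
      Option.isSome_iff_exists.mp ((PySem.List.index?_isSome_iff vector 0).mpr h0)
    obtain ⟨hzlt, hz0, hfirst⟩ := PySem.List.getElem_of_index?_eq_some hiz
    have hz? : vector[z]? = some 0 := by rw [List.getElem?_eq_getElem hzlt]; exact congrArg some hz0
    have hfirst? : ∀ j, j < z → vector[j]? ≠ some 0 := by
      intro j hj e
      obtain ⟨hjl, hje⟩ := List.getElem?_eq_some_iff.mp e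
      exact hfirst j hj hje
    have hcont : vector.contains 0 = true := by simpa using h0
    have hcntp : 0 < List.count 0 vector := List.count_pos_iff.mpr h0
    have hcnt : ¬ PySem.List.count vector 0 = 0 := by
      rw [PySem.List.count_eq]; omega
    have hB : checkHead_alt vector
        = vector.mapIdx (fun j x => if (j : Int) ≠ (z : Int) ∧ (x = 0 ∨ x = 999) then (z : Int) + 1 else x) := by
      simp only [checkHead_alt, hcont, if_pos, hiz, Option.getD_some]
      rw [PySem.List.pySetD_natCast, set_of_getElem? vector z 0 hz?]
      rw [enumerate_map_eq_mapIdx (fun a x => if a ≠ (z : Int) ∧ (x = 0 ∨ x = 999) then (z : Int) + 1 else x) 0 vector]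
      simp
    rw [hB]
    simp only [checkHead, if_neg hcnt]
    by_cases hc1 : PySem.List.count vector 0 > 1
    · -- more than one zero: A's first pass rewrites the extra zeros, the 999 pass the 999s
      simp only [if_pos hc1, hiz, Option.getD_some]
      rw [loopzero_eq vector z]
      rw [loop999_eq (vector.mapIdx (fun j x => if x = 0 ∧ (j : Int) ≠ (z : Int) then (z : Int) + 1 else x)) z
        ?_ ?_]
      · exact final_double vector z hz?
      · rw [List.getElem?_mapIdx, hz?]
        simp
      · intro j hj e
        rw [List.getElem?_mapIdx] at e
        rcases hv : vector[j]? with _ | y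
        · rw [hv] at e; simp at e
        · rw [hv] at e
          simp only [Option.map_some, Option.some.injEq] at e
          have hy : y ≠ 0 := fun ey => hfirst? j hj (by rw [hv, ey])
          by_cases hcnd : y = 0 ∧ (j : Int) ≠ (z : Int)
          · exact hy hcnd.1
          · rw [if_neg hcnd] at e; exact hy e
    · -- exactly one zero: A's first pass is skipped and z is the only zero
      have hone : List.count 0 vector = 1 := by
        rw [PySem.List.count_eq] at hc1 hcnt
        omega
      simp only [if_neg hc1]
      rw [loop999_eq vector z hz? hfirst?]
      apply final_single vector z hz?
      intro j hjz e
      rcases Nat.lt_or_ge j z with h | h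
      · exact hfirst? j h e
      · have hzj : z < j := lt_of_le_of_ne h (fun ez => hjz ez.symm)
        have := two_le_count vector z j hzj hz? e
        omega
  · -- no zero: A and B both write a zero at the first 999, or at position 0
    have hcnt0 : PySem.List.count vector 0 = 0 := by
      rw [PySem.List.count_eq]
      exact List.count_eq_zero.mpr h0
    have hcont0 : vector.contains 0 = false := by simpa using h0
    rcases h9 : PySem.List.index? vector 999 with _ | p
    · -- no 999 either: both set position 0
      have hmem9 : (999 : Int) ∉ vector := (PySem.List.index?_eq_none_iff vector 999).mp h9
      have hcont9 : vector.contains 999 = false := by simpa using hmem9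
      have hlen : 0 < vector.length := List.length_pos_iff.mpr hpre
      have hv0 : (vector.set 0 0)[0]? = some 0 := List.getElem?_set_self hlen
      have huniq : ∀ j, j ≠ 0 → (vector.set 0 0)[j]? ≠ some 0 := by
        intro j hj
        rw [List.getElem?_set_ne (fun e => hj e.symm)]
        exact getElem?_ne_of_not_mem vector j h0
      simp only [checkHead, checkHead_alt, hcnt0, if_pos, h9, hcont0, hcont9, Bool.false_eq_true,
        if_false, show ((0:Nat) > 1) = False from by simp, PySem.List.pySetD_natCast]
      rw [show PySem.List.pySetD vector (0:Int) 0 = vector.set 0 0 from by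
        simpa using PySem.List.pySetD_natCast vector 0 0]
      rw [loop999_eq (vector.set 0 0) 0 hv0 (fun j hj => absurd hj (Nat.not_lt_zero j))]
      rw [enumerate_map_eq_mapIdx (fun a x => if a ≠ ((0:Nat):Int) ∧ (x = 0 ∨ x = 999) then ((0:Nat):Int) + 1 else x) 0 (vector.set 0 0)]
      simpa using final_single (vector.set 0 0) 0 hv0 huniq
    · -- a 999 at p: both choose p and set it to 0
      obtain ⟨hplt, hp9, hpfirst⟩ := PySem.List.getElem_of_index?_eq_some h9
      have hmem9 : (999 : Int) ∈ vector := by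
        have := (PySem.List.index?_isSome_iff vector 999).mp (by rw [h9]; rfl)
        exact this
      have hcont9 : vector.contains 999 = true := by simpa using hmem9
      have hvp : (vector.set p 0)[p]? = some 0 := List.getElem?_set_self hplt
      have hfir : ∀ j, j < p → (vector.set p 0)[j]? ≠ some 0 := by
        intro j hj
        rw [List.getElem?_set_ne (by omega : p ≠ j)]
        exact getElem?_ne_of_not_mem vector j h0
      have huniq : ∀ j, j ≠ p → (vector.set p 0)[j]? ≠ some 0 := by
        intro j hj
        rw [List.getElem?_set_ne (fun e => hj e.symm)]
        exact getElem?_ne_of_not_mem vector j h0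
      simp only [checkHead, checkHead_alt, hcnt0, if_pos, h9, hcont0, hcont9, Bool.false_eq_true,
        if_false, show ((0:Nat) > 1) = False from by simp, Option.getD_some,
        PySem.List.pySetD_natCast]
      rw [loop999_eq (vector.set p 0) p hvp hfir]
      rw [enumerate_map_eq_mapIdx (fun a x => if a ≠ ((p:Nat):Int) ∧ (x = 0 ∨ x = 999) then ((p:Nat):Int) + 1 else x) 0 (vector.set p 0)]
      simpa using final_single (vector.set p 0) p hvp huniq

-- ===== VERDICT (by name: the statement is the Claim_ definition above) =====
theorem checkHead_spec : Claim_equal_checkHead := by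
  intro vector _ hpre
  unfold Spec_checkHead
  exact main_eq vector hpre
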